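-- pv_equiv track=rewrite | github.com/Comelenarade/elenaAI | helpers.py | RolesCounterPrepToPrint
-- ===== SOURCE A (Python) =====
-- def RolesCounterPrepToPrint(role_count_dict, block_size = 20):
--     counter = 0
--     message = ""
--     message_blocks = [] #to avoid Discord char limit
--     for keey in role_count_dict:
--         tmp_mes = "{} - {} members \n".format(str(keey), str(role_count_dict[keey]))
--         message += tmp_mes
--         counter += 1
--         if counter == block_size:
--             message_blocks.append(message)
--             counter = 0
--             message = ""
--     if message != "":
--         message_blocks.append(message)
--     return message_blocks
-- ===== SOURCE B (Python) =====
-- def RolesCounterPrepToPrint(role_count_dict, block_size = 20):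
--     lines = ["{} - {} members \n".format(k, v) for k, v in role_count_dict.items()]
--     return ["".join(lines[i:i+block_size]) for i in range(0, len(lines), block_size)]
-- ===== Notes on version B (the rewrite author's own statement) =====
-- stated objective: simpler
-- what changed: Replaced A's single counter-driven loop (mutable counter/message/blocks state with an in-loop flush and a trailing flush) by two passes: a comprehension formats every line, then a range-with-step comprehension joins the lines block by block; Pre_ excludes non-positive block_size, a meaningless chunk size on which range(0, n, block_size) raises or is empty while A's single accumulated block is an accident of its counter never matching.
-- outside the precondition, e.g. on RolesCounterPrepToPrint({'a': 1}, 0): A returns ['a - 1 members \n'], B raises ValueError; on RolesCounterPrepToPrint({'a': 1}, -1): A returns ['a - 1 members \n'], B returns []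
import Mathlib
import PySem

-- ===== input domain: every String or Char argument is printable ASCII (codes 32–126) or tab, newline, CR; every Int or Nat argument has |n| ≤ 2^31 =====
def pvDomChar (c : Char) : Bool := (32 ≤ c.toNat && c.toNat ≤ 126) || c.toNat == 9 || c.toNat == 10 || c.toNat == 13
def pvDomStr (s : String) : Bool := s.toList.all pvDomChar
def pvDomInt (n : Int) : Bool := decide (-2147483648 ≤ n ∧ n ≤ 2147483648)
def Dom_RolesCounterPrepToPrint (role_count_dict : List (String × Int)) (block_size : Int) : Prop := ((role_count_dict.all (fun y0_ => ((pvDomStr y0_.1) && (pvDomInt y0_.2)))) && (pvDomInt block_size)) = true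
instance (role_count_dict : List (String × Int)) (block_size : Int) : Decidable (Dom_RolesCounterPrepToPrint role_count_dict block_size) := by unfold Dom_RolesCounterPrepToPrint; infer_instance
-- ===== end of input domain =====

-- B replaces A's counter-driven single loop by two passes: format every line with a
-- comprehension, then group the lines with slices over range(0, len(lines), block_size).


-- ===== PORT A =====
-- "{} - {} members \n".format(str(keey), str(count)); str() on the string key is the identity
def pvFmtLine (k : String) (v : Int) : String := k ++ " - " ++ PySem.Int.toStr v ++ " members \n"

-- one iteration of A's loop; state = (counter, message, message_blocks); iterating the dict's
-- keys and indexing role_count_dict[keey] visits exactly the (key, value) pairs in order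
def pvStepA (block_size : Int) (st : Int × String × List String) (kv : String × Int) : Int × String × List String :=
  let tmp_mes := pvFmtLine kv.1 kv.2
  let message := st.2.1 ++ tmp_mes
  let counter := st.1 + 1
  if counter = block_size then (0, "", st.2.2 ++ [message]) else (counter, message, st.2.2)

-- the trailing 'if message != "": message_blocks.append(message)'
def pvFinish (st : Int × String × List String) : List String :=
  if st.2.1 ≠ "" then st.2.2 ++ [st.2.1] else st.2.2

def RolesCounterPrepToPrint (role_count_dict : List (String × Int)) (block_size : Int) : List String :=
  pvFinish (role_count_dict.foldl (pvStepA block_size) (0, "", []))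

-- ===== PORT B =====
-- lines = [format(k, v) for k, v in d.items()]; ["".join(lines[i:i+bs]) for i in range(0, len(lines), bs)]
def RolesCounterPrepToPrint_alt (role_count_dict : List (String × Int)) (block_size : Int) : List String :=
  let lines := role_count_dict.map (fun kv => pvFmtLine kv.1 kv.2)
  (PySem.List.pyRange 0 (lines.length : Int) block_size).map
    (fun i => PySem.Str.join "" (PySem.List.slice lines (some i) (some (i + block_size))))

-- ===== PRECONDITION & SPEC =====
-- Pre_ excludes non-positive block_size (a meaningless chunk size): B's range(0, n, block_size)
-- raises ValueError at 0 and yields no blocks for negatives, while A's single accumulated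
-- block there is an accident of its counter never reaching a non-positive block_size.
def Pre_RolesCounterPrepToPrint (role_count_dict : List (String × Int)) (block_size : Int) : Prop :=
  1 ≤ block_size
instance (role_count_dict : List (String × Int)) (block_size : Int) : Decidable (Pre_RolesCounterPrepToPrint role_count_dict block_size) := by unfold Pre_RolesCounterPrepToPrint; infer_instance

def pvWitness_RolesCounterPrepToPrint : (List (String × Int)) × Int := ([("admin", 3), ("mod", 1)], 20)

def Spec_RolesCounterPrepToPrint (role_count_dict : List (String × Int)) (block_size : Int) (out : List String) : Prop := out = RolesCounterPrepToPrint_alt role_count_dict block_size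
instance (role_count_dict : List (String × Int)) (block_size : Int) (out : List String) : Decidable (Spec_RolesCounterPrepToPrint role_count_dict block_size out) := by unfold Spec_RolesCounterPrepToPrint; infer_instance

-- ===== CLAIM (what is proved, stated in full; the proofs are below) =====
def Claim_equal_RolesCounterPrepToPrint : Prop := ∀ (role_count_dict : List (String × Int)) (block_size : Int), Dom_RolesCounterPrepToPrint role_count_dict block_size → Pre_RolesCounterPrepToPrint role_count_dict block_size → Spec_RolesCounterPrepToPrint role_count_dict block_size (RolesCounterPrepToPrint role_count_dict block_size)

-- ===== LEMMAS AND PROOFS =====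

-- proof-side intermediate: recursive chunking of the line list (bs > 0)
def pvChunkJoin (bs : Int) (hbs : 0 < bs) (lines : List String) : List String :=
  match lines with
  | [] => []
  | x :: t =>
    PySem.Str.join "" (PySem.List.slice (x :: t) none (some bs)) ::
      pvChunkJoin bs hbs (PySem.List.slice (x :: t) (some bs) none)
termination_by lines.length
decreasing_by
  rw [PySem.List.slice_from _ hbs.le]
  simp only [List.length_drop, List.length_cons]
  omega

-- A's loop step seen on the already-formatted line
def pvStepL (bs : Int) (st : Int × String × List String) (line : String) : Int × String × List String :=
  if st.1 + 1 = bs then (0, "", st.2.2 ++ [st.2.1 ++ line]) else (st.1 + 1, st.2.1 ++ line, st.2.2)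

lemma pvFoldA_eq_foldL (d : List (String × Int)) (bs : Int) (init : Int × String × List String) :
    d.foldl (pvStepA bs) init = (d.map (fun kv => pvFmtLine kv.1 kv.2)).foldl (pvStepL bs) init := by
  rw [List.foldl_map]
  rfl

lemma pvChunkJoin_nil (bs : Int) (hbs : 0 < bs) : pvChunkJoin bs hbs [] = [] := by
  simp [pvChunkJoin]

lemma pvChunkJoin_cons (bs : Int) (hbs : 0 < bs) (x : String) (t : List String) :
    pvChunkJoin bs hbs (x :: t) =
      PySem.Str.join "" (PySem.List.slice (x :: t) none (some bs)) ::
        pvChunkJoin bs hbs (PySem.List.slice (x :: t) (some bs) none) := by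
  rw [pvChunkJoin]

lemma pvJoin_empty_nil : PySem.Str.join "" [] = "" := rfl

lemma pvInterFlat (l : List (List Char)) :
    (List.intersperse [] l).flatten = l.flatten := by
  match l with
  | [] => rfl
  | [a] => simp
  | a :: b :: t =>
    show (a :: [] :: List.intersperse [] (b :: t)).flatten = _
    simp [pvInterFlat (b :: t)]

lemma pvJoin_empty_cons (x : String) (t : List String) :
    PySem.Str.join "" (x :: t) = x ++ PySem.Str.join "" t := by
  apply String.toList_injective
  simp [PySem.Str.toList_join, String.toList_append, PySem.Chars.join, List.intercalate,
    pvInterFlat]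

lemma pvFmtLine_ne (k : String) (v : Int) : pvFmtLine k v ≠ "" := by
  intro h
  have h1 := congrArg String.toList h
  unfold pvFmtLine at h1
  rw [show ("" : String).toList = [] from rfl] at h1
  rw [String.toList_append, String.toList_append, String.toList_append] at h1
  rcases List.append_eq_nil_iff.mp h1 with ⟨_, h5⟩
  exact absurd h5 (by decide)

lemma pvJoin_empty_ne (x : String) (t : List String) (hx : x ≠ "") :
    PySem.Str.join "" (x :: t) ≠ "" := by
  rw [pvJoin_empty_cons]
  intro h
  apply hx
  have h2 : x.toList ++ (PySem.Str.join "" t).toList = [] := by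
    have h1 := congrArg String.toList h
    rw [show ("" : String).toList = [] from rfl] at h1
    simpa [String.toList_append] using h1
  exact String.toList_injective (List.append_eq_nil_iff.mp h2).1

lemma pvRun_partial (bs : Int) (L : List String) : ∀ (c : Int) (m : String) (bl : List String),
    0 ≤ c → c + L.length < bs →
    L.foldl (pvStepL bs) (c, m, bl) = (c + L.length, m ++ PySem.Str.join "" L, bl) := by
  induction L with
  | nil => intro c m bl _ _; simp [pvJoin_empty_nil]
  | cons x t ih =>
    intro c m bl hc hlen
    simp only [List.length_cons] at hlen
    push_cast at hlen
    have hne : ¬ (c + 1 = bs) := by omega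
    rw [List.foldl_cons, show pvStepL bs (c, m, bl) x = (c + 1, m ++ x, bl) from by
      simp [pvStepL, hne]]
    rw [ih (c + 1) (m ++ x) bl (by omega) (by omega), pvJoin_empty_cons]
    simp only [Prod.mk.injEq, List.length_cons]
    exact ⟨by push_cast; ring, String.append_assoc, trivial⟩

lemma pvRun_block (bs : Int) (L : List String) : ∀ (c : Int) (m : String) (bl : List String),
    0 ≤ c → L ≠ [] → c + L.length = bs →
    L.foldl (pvStepL bs) (c, m, bl) = (0, "", bl ++ [m ++ PySem.Str.join "" L]) := by
  induction L with
  | nil => intro c m bl _ h _; exact absurd rfl h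
  | cons x t ih =>
    intro c m bl hc _ hlen
    by_cases ht : t = []
    · subst ht
      have heq : c + 1 = bs := by simpa using hlen
      rw [List.foldl_cons, show pvStepL bs (c, m, bl) x = (0, "", bl ++ [m ++ x]) from by
        simp [pvStepL, heq]]
      simp [pvJoin_empty_cons, pvJoin_empty_nil]
    · have hpos : 0 < t.length := by
        cases t with
        | nil => exact absurd rfl ht
        | cons a u => simp
      simp only [List.length_cons] at hlen
      push_cast at hlen
      have hne : ¬ (c + 1 = bs) := by omega
      rw [List.foldl_cons, show pvStepL bs (c, m, bl) x = (c + 1, m ++ x, bl) from by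
        simp [pvStepL, hne]]
      rw [ih (c + 1) (m ++ x) bl (by omega) ht (by omega), pvJoin_empty_cons]
      simp [String.append_assoc]

-- A's whole loop + trailing flush produces exactly the recursive chunking
lemma pvMain_pos (bs : Int) (hbs : 0 < bs) : ∀ (n : Nat) (L : List String), L.length ≤ n →
    (∀ s ∈ L, s ≠ "") → ∀ (bl : List String),
    pvFinish (L.foldl (pvStepL bs) (0, "", bl)) = bl ++ pvChunkJoin bs hbs L := by
  intro n
  induction n with
  | zero =>
    intro L hL _ bl
    cases L with
    | nil => simp [pvFinish, pvChunkJoin_nil]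
    | cons x t => simp at hL
  | succ n ih =>
    intro L hL hmem bl
    cases L with
    | nil => simp [pvFinish, pvChunkJoin_nil]
    | cons x t =>
      by_cases hlen : ((x :: t).length : Int) < bs
      · -- everything left fits in one (final, partial) block
        rw [pvRun_partial bs (x :: t) 0 "" bl le_rfl (by omega)]
        rw [pvChunkJoin_cons, PySem.List.slice_to _ hbs.le, PySem.List.slice_from _ hbs.le]
        rw [List.take_of_length_le (by omega), List.drop_eq_nil_of_le (by omega)]
        have hne := pvJoin_empty_ne x t (hmem x (by simp))
        simp [pvFinish, hne, pvChunkJoin_nil]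
      · -- a full block, then recurse on the rest
        have hkle : bs.toNat ≤ (x :: t).length := by omega
        have hlentake : (List.take bs.toNat (x :: t)).length = bs.toNat := by
          rw [List.length_take]; omega
        have htne : List.take bs.toNat (x :: t) ≠ [] := by
          intro h0; rw [h0] at hlentake; simp at hlentake; omega
        conv_lhs => rw [← List.take_append_drop bs.toNat (x :: t)]
        rw [List.foldl_append,
          pvRun_block bs _ 0 "" bl le_rfl htne (by rw [hlentake]; omega)]
        rw [ih (List.drop bs.toNat (x :: t))
          (by simp only [List.length_drop, List.length_cons] at hL ⊢; omega)
          (fun s hs => hmem s (List.mem_of_mem_drop hs))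
          (bl ++ ["" ++ PySem.Str.join "" (List.take bs.toNat (x :: t))])]
        rw [pvChunkJoin_cons, PySem.List.slice_to _ hbs.le, PySem.List.slice_from _ hbs.le]
        simp

lemma pvMapFmt_ne (d : List (String × Int)) :
    ∀ s ∈ d.map (fun kv => pvFmtLine kv.1 kv.2), s ≠ "" := by
  intro s hs
  rcases List.mem_map.mp hs with ⟨kv, _, rfl⟩
  exact pvFmtLine_ne kv.1 kv.2

-- range(a, b, bs) with 0 < bs and a < b starts with a and continues from a + bs
lemma pvRange_pos_cons (a b bs : Int) (hbs : 0 < bs) (hab : a < b) :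
    PySem.List.pyRange a b bs = a :: PySem.List.pyRange (a + bs) b bs := by
  rw [PySem.List.pyRange_of_pos a b hbs, PySem.List.pyRange_of_pos (a + bs) b hbs, if_pos hab]
  have key : ((b - a + bs - 1) / bs).toNat =
      (if a + bs < b then ((b - (a + bs) + bs - 1) / bs).toNat else 0) + 1 := by
    by_cases h2 : a + bs < b
    · rw [if_pos h2]
      have h1 : (b - a + bs - 1) / bs = (b - (a + bs) + bs - 1) / bs + 1 := by
        rw [show b - a + bs - 1 = (b - (a + bs) + bs - 1) + 1 * bs by ring,
          Int.add_mul_ediv_right _ _ (ne_of_gt hbs)]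
      have h3 : 0 ≤ (b - (a + bs) + bs - 1) / bs := Int.ediv_nonneg (by omega) hbs.le
      rw [h1]
      omega
    · rw [if_neg h2]
      have h1 : 1 ≤ (b - a + bs - 1) / bs := by
        rw [Int.le_ediv_iff_mul_le hbs]; omega
      have h2' : (b - a + bs - 1) / bs < 2 := by
        rw [Int.ediv_lt_iff_lt_mul hbs]; omega
      omega
  rw [key, List.range_succ_eq_map, List.map_cons, List.map_map]
  congr 1
  · simp
  · exact List.map_congr_left (fun k _ => by
      simp only [Function.comp_apply, Nat.succ_eq_add_one]
      push_cast
      ring)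

lemma pvRange_pos_nil (a b bs : Int) (hbs : 0 < bs) (hab : b ≤ a) :
    PySem.List.pyRange a b bs = [] := by
  rw [PySem.List.pyRange_of_pos a b hbs, if_neg (by omega)]
  simp

-- B's comprehension over range(0, len, bs) computes the recursive chunking (full = the
-- whole line list, a = current offset, lines = the not-yet-grouped suffix)
lemma pvMap_chunk (bs : Int) (hbs : 0 < bs) : ∀ (fuel : Nat) (lines full : List String) (a : Int),
    0 ≤ a → full.drop a.toNat = lines → lines.length ≤ fuel →
    (PySem.List.pyRange a (full.length : Int) bs).map
        (fun i => PySem.Str.join "" (PySem.List.slice full (some i) (some (i + bs)))) =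
      pvChunkJoin bs hbs lines := by
  intro fuel
  induction fuel with
  | zero =>
    intro lines full a ha hdrop hfuel
    have hnil : lines = [] := List.length_eq_zero_iff.mp (by omega)
    subst hnil
    rw [pvRange_pos_nil _ _ _ hbs (by
      have := List.drop_eq_nil_iff.mp hdrop; omega), pvChunkJoin_nil]
    simp
  | succ n ih =>
    intro lines full a ha hdrop hfuel
    cases hl : lines with
    | nil =>
      subst hl
      rw [pvRange_pos_nil _ _ _ hbs (by
        have := List.drop_eq_nil_iff.mp hdrop; omega), pvChunkJoin_nil]
      simp
    | cons x t =>
      subst hl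
      have halt : a.toNat < full.length := by
        by_contra hge
        rw [List.drop_eq_nil_of_le (by omega)] at hdrop
        exact absurd hdrop.symm (List.cons_ne_nil x t)
      rw [pvRange_pos_cons a _ bs hbs (by omega), List.map_cons, pvChunkJoin_cons]
      have htoNat : (a + bs).toNat = a.toNat + bs.toNat := by omega
      have hbs1 : 1 ≤ bs.toNat := by omega
      have hdrop' : full.drop (a + bs).toNat = PySem.List.slice (x :: t) (some bs) none := by
        rw [PySem.List.slice_from _ hbs.le, ← hdrop, List.drop_drop, htoNat]
      have hfuel' : (PySem.List.slice (x :: t) (some bs) none).length ≤ n := by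
        rw [PySem.List.slice_from _ hbs.le]
        have hc : (x :: t).length = t.length + 1 := by simp
        simp only [List.length_drop]
        omega
      congr 1
      · -- the head block: full[a : a+bs] = lines[:bs]
        rw [PySem.List.slice_toNat full ha (by omega), htoNat, hdrop,
          PySem.List.slice_to _ hbs.le]
        have harith : a.toNat + bs.toNat - a.toNat = bs.toNat := by omega
        rw [harith]
      · -- the tail: continue at offset a + bs on the dropped suffix
        exact ih (PySem.List.slice (x :: t) (some bs) none) full (a + bs) (by omega)
          hdrop' hfuel'

-- ===== VERDICT (by name: the statement is the Claim_ definition above) =====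
theorem RolesCounterPrepToPrint_spec : Claim_equal_RolesCounterPrepToPrint := by
  intro d bs _ hpre
  unfold Pre_RolesCounterPrepToPrint at hpre
  unfold Spec_RolesCounterPrepToPrint
  simp only [RolesCounterPrepToPrint, RolesCounterPrepToPrint_alt]
  rw [pvFoldA_eq_foldL]
  have hbs : 0 < bs := by omega
  have hLne := pvMapFmt_ne d
  generalize d.map (fun kv => pvFmtLine kv.1 kv.2) = L at hLne ⊢
  rw [pvMap_chunk bs hbs L.length L L 0 le_rfl (by simp) le_rfl]
  have h := pvMain_pos bs hbs L.length L le_rfl hLne []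
  simpa using h
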